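-- pv_equiv track=rewrite | github.com/LiranAvda-TAU/Research | Code/Utils/Strings.py | getAminoAcidInLocationInAlignment
-- ===== SOURCE A (Python) =====
-- def getAminoAcidInLocationInAlignment(location: int, sequence_alignment):
--     if location > len(sequence_alignment.replace("-", "")):
--         return len(sequence_alignment)
--     index = 0
--     while location > 0:
--         if 'A' <= sequence_alignment[index] <= 'Z':
--             location -= 1
--         index += 1
--     return index
-- ===== SOURCE B (Python) =====
-- def getAminoAcidInLocationInAlignment(location, sequence_alignment):
--     if location > len(sequence_alignment.replace("-", "")):
--         return len(sequence_alignment)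
--     if location <= 0:
--         return 0
--     ups = [i for i, c in enumerate(sequence_alignment) if 'A' <= c <= 'Z']
--     return ups[location - 1] + 1
-- ===== Notes on version B (the rewrite author's own statement) =====
-- stated objective: alternative
-- what changed: Replaces A's early-stopping character-consuming while loop with a precomputed table of uppercase positions (one comprehension) followed by a single indexed lookup ups[location-1]+1.
import Mathlib
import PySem

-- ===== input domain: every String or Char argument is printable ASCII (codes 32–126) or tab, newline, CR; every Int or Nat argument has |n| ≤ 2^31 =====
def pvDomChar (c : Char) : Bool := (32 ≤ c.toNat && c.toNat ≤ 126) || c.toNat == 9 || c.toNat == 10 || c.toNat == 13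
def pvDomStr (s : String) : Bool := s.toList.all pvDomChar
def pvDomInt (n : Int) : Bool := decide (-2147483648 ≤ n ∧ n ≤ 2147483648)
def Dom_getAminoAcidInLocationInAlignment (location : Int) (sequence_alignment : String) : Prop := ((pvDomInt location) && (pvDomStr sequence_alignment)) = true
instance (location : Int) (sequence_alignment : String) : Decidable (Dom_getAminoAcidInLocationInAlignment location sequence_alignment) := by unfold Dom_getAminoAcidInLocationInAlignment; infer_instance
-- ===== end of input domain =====

-- B replaces A's early-stopping consuming while loop by a precomputed table of uppercase
-- positions plus one indexed lookup (alternative decomposition, same cost).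

-- ===== PORT A =====
-- A's while loop: walks the characters, decrementing location on 'A'..'Z';
-- the [] case is where Python raises IndexError (excluded by Pre_).
def pvALoop (loc : Int) (cs : List Char) (idx : Int) : Int :=
  if loc > 0 then
    match cs with
    | [] => idx
    | c :: rest => pvALoop (if 'A' ≤ c ∧ c ≤ 'Z' then loc - 1 else loc) rest (idx + 1)
  else idx
termination_by cs.length

def getAminoAcidInLocationInAlignment (location : Int) (sequence_alignment : String) : Int :=
  if location > PySem.Str.len (PySem.Str.replace sequence_alignment "-" "") then
    PySem.Str.len sequence_alignment
  else
    pvALoop location sequence_alignment.toList 0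

-- ===== PORT B =====
def getAminoAcidInLocationInAlignment_alt (location : Int) (sequence_alignment : String) : Int :=
  if location > PySem.Str.len (PySem.Str.replace sequence_alignment "-" "") then
    PySem.Str.len sequence_alignment
  else if location ≤ 0 then 0
  else
    -- ups = [i for i, c in enumerate(sequence_alignment) if 'A' <= c <= 'Z']
    let ups := ((PySem.List.enumerate sequence_alignment.toList 0).filter
        (fun ic => decide ('A' ≤ ic.2) && decide (ic.2 ≤ 'Z'))).map (·.1)
    -- ups[location - 1] + 1 (Source B raises IndexError when out of range; excluded by Pre_)
    PySem.List.pyGetD ups (location - 1) 0 + 1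

-- ===== PRECONDITION & SPEC =====
-- Pre_ excludes exactly the inputs where the Python A raises IndexError: 0 < location,
-- location within the non-dash length, but more than the number of uppercase letters
-- (B raises IndexError on exactly the same inputs).
def Pre_getAminoAcidInLocationInAlignment (location : Int) (sequence_alignment : String) : Prop :=
  location ≤ 0 ∨
  location > (sequence_alignment.toList.countP (fun c => !(c == '-')) : Int) ∨
  location ≤ (sequence_alignment.toList.countP (fun c => decide ('A' ≤ c) && decide (c ≤ 'Z')) : Int)
instance (location : Int) (sequence_alignment : String) : Decidable (Pre_getAminoAcidInLocationInAlignment location sequence_alignment) := by unfold Pre_getAminoAcidInLocationInAlignment; infer_instance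

def pvWitness_getAminoAcidInLocationInAlignment : Int × String := (2, "a-AB-C")

def Spec_getAminoAcidInLocationInAlignment (location : Int) (sequence_alignment : String) (out : Int) : Prop := out = getAminoAcidInLocationInAlignment_alt location sequence_alignment
instance (location : Int) (sequence_alignment : String) (out : Int) : Decidable (Spec_getAminoAcidInLocationInAlignment location sequence_alignment out) := by unfold Spec_getAminoAcidInLocationInAlignment; infer_instance

-- ===== CLAIM (what is proved, stated in full; the proofs are below) =====
def Claim_equal_getAminoAcidInLocationInAlignment : Prop := ∀ (location : Int) (sequence_alignment : String), Dom_getAminoAcidInLocationInAlignment location sequence_alignment → Pre_getAminoAcidInLocationInAlignment location sequence_alignment → Spec_getAminoAcidInLocationInAlignment location sequence_alignment (getAminoAcidInLocationInAlignment location sequence_alignment)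

-- ===== LEMMAS AND PROOFS =====

-- the table of uppercase positions built by B, with an arbitrary enumerate start
def pvUps (cs : List Char) (st : Int) : List Int :=
  ((PySem.List.enumerate cs st).filter
      (fun ic => decide ('A' ≤ ic.2) && decide (ic.2 ≤ 'Z'))).map (·.1)

theorem pvUps_cons' (c : Char) (rest : List Char) (st : Int) :
    pvUps (c :: rest) st =
      (if 'A' ≤ c ∧ c ≤ 'Z' then [st] else []) ++ pvUps rest (st + 1) := by
  unfold pvUps
  rw [PySem.List.enumerate_cons]
  by_cases hup : 'A' ≤ c ∧ c ≤ 'Z'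
  · simp [List.filter_cons, hup.1, hup.2]
  · rw [Decidable.not_and_iff_not_or_not] at hup
    rcases hup with hup | hup <;>
      simp [List.filter_cons, hup, Decidable.not_and_iff_not_or_not, hup]

theorem pvUps_shift (cs : List Char) : ∀ (st : Int),
    pvUps cs (st + 1) = (pvUps cs st).map (· + 1) := by
  induction cs with
  | nil => intro st; simp [pvUps, PySem.List.enumerate_nil]
  | cons c rest ih =>
      intro st
      rw [pvUps_cons', pvUps_cons', ih (st + 1), List.map_append]
      by_cases hup : 'A' ≤ c ∧ c ≤ 'Z'
      · simp [hup]
      · simp [hup]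

theorem pvUps_cons (c : Char) (rest : List Char) :
    pvUps (c :: rest) 0 =
      (if 'A' ≤ c ∧ c ≤ 'Z' then [(0 : Int)] else []) ++ (pvUps rest 0).map (· + 1) := by
  rw [pvUps_cons', show (0 : Int) + 1 = 0 + 1 from rfl, pvUps_shift]

theorem pvUps_length (cs : List Char) :
    (pvUps cs 0).length
      = cs.countP (fun c => decide ('A' ≤ c) && decide (c ≤ 'Z')) := by
  induction cs with
  | nil => simp [pvUps, PySem.List.enumerate_nil]
  | cons c rest ih =>
      rw [pvUps_cons, List.countP_cons]
      by_cases hup : 'A' ≤ c ∧ c ≤ 'Z'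
      · simp [hup.1, hup.2, ih]
      · rw [Decidable.not_and_iff_not_or_not] at hup
        rcases hup with hup | hup <;> simp [hup, ih]

theorem pvReplaceGo_dash : ∀ (fuel : Nat) (l acc : List Char), l.length ≤ fuel →
    PySem.Chars.replace.go ['-'] [] fuel l acc
      = acc.reverse ++ l.filter (fun c => !(c == '-')) := by
  intro fuel
  induction fuel with
  | zero =>
      intro l acc h
      have hl : l = [] := by cases l <;> simp_all
      subst hl
      simp [PySem.Chars.replace.go.eq_def]
  | succ fuel ih =>
      intro l acc h
      rw [PySem.Chars.replace.go.eq_def]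
      cases l with
      | nil => simp
      | cons c t =>
          by_cases hc : c = '-'
          · subst hc
            simp [List.isPrefixOf, ih t acc (by simp at h; omega), List.filter_cons]
          · have hne : (('-' : Char) == c) = false := by
              simp only [beq_eq_false_iff_ne, ne_eq]
              exact fun hh => hc hh.symm
            simp [List.isPrefixOf, hne, ih t (c :: acc) (by simp at h; omega),
              List.filter_cons, hc]

theorem pvReplaceDashLen (s : String) :
    PySem.Str.len (PySem.Str.replace s "-" "")
      = (s.toList.countP (fun c => !(c == '-')) : Int) := by
  have h1 : (PySem.Str.replace s "-" "").toList
      = PySem.Chars.replace s.toList "-".toList "".toList := PySem.Str.toList_replace s "-" ""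
  have h2 : PySem.Chars.replace s.toList "-".toList "".toList
      = s.toList.filter (fun c => !(c == '-')) := by
    show PySem.Chars.replace s.toList ['-'] [] = _
    unfold PySem.Chars.replace
    rw [if_neg (by simp)]
    rw [pvReplaceGo_dash s.toList.length s.toList [] le_rfl]
    simp
  rw [PySem.Str.len_eq, h1, h2]
  simp [List.countP_eq_length_filter]

theorem pvALoop_of_nonpos (loc : Int) (cs : List Char) (idx : Int) (h : loc ≤ 0) :
    pvALoop loc cs idx = idx := by
  rw [pvALoop.eq_def]
  simp [show ¬ loc > 0 by omega]

theorem pvALoop_eq (cs : List Char) : ∀ (loc idx : Int), 0 < loc →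
    loc ≤ (cs.countP (fun c => decide ('A' ≤ c) && decide (c ≤ 'Z')) : Int) →
    pvALoop loc cs idx = idx + PySem.List.pyGetD (pvUps cs 0) (loc - 1) 0 + 1 := by
  induction cs with
  | nil =>
      intro loc idx h0 hle
      simp at hle; omega
  | cons c rest ih =>
      intro loc idx h0 hle
      rw [pvALoop.eq_def]
      simp only [h0, if_pos]
      rw [List.countP_cons] at hle
      rw [pvUps_cons]
      by_cases hup : 'A' ≤ c ∧ c ≤ 'Z'
      · rw [if_pos hup, if_pos hup]
        simp only [List.cons_append, List.nil_append]
        by_cases h1 : loc = 1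
        · subst h1
          rw [pvALoop_of_nonpos _ _ _ (by omega)]
          rw [show (1 : Int) - 1 = 0 from rfl, PySem.List.pyGetD_zero_cons]
          omega
        · have h2 : 0 < loc - 1 := by omega
          have hle' : loc - 1 ≤ (rest.countP (fun c => decide ('A' ≤ c) && decide (c ≤ 'Z')) : Int) := by
            simp [hup.1, hup.2] at hle; omega
          rw [ih (loc - 1) (idx + 1) h2 hle']
          have hlen : (loc - 1 - 1).toNat < (pvUps rest 0).length := by
            rw [pvUps_length]; omega
          have hlen2 : ((loc : Int) - 1).toNat < ((0 : Int) :: (pvUps rest 0).map (· + 1)).length := by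
            simp [pvUps_length]; omega
          rw [PySem.List.pyGetD_eq_getElem _ _ (by omega) (by rw [pvUps_length]; omega),
              PySem.List.pyGetD_eq_getElem _ _ (by omega) (by simp [pvUps_length]; omega)]
          have hidx : (loc - 1).toNat = (loc - 1 - 1).toNat + 1 := by omega
          simp only [hidx, List.getElem_cons_succ, List.getElem_map]
          omega
      · rw [if_neg hup, if_neg hup]
        simp only [List.nil_append]
        have hle' : loc ≤ (rest.countP (fun c => decide ('A' ≤ c) && decide (c ≤ 'Z')) : Int) := by
          rw [Decidable.not_and_iff_not_or_not] at hup
          rcases hup with h | h <;> simp [h] at hle <;> omega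
        rw [ih loc (idx + 1) h0 hle']
        rw [PySem.List.pyGetD_eq_getElem _ _ (by omega) (by rw [pvUps_length]; omega),
            PySem.List.pyGetD_eq_getElem _ _ (by omega) (by simp [pvUps_length]; omega)]
        simp only [List.getElem_map]
        omega

-- ===== VERDICT (by name: the statement is the Claim_ definition above) =====
theorem getAminoAcidInLocationInAlignment_spec : Claim_equal_getAminoAcidInLocationInAlignment := by
  intro loc s _ hpre
  unfold Spec_getAminoAcidInLocationInAlignment
  unfold getAminoAcidInLocationInAlignment getAminoAcidInLocationInAlignment_alt
  by_cases hg : loc > PySem.Str.len (PySem.Str.replace s "-" "")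
  · rw [if_pos hg, if_pos hg]
  · rw [if_neg hg, if_neg hg]
    by_cases h0 : loc ≤ 0
    · rw [if_pos h0, pvALoop_of_nonpos _ _ _ h0]
    · rw [if_neg h0]
      have hle : loc ≤ (s.toList.countP (fun c => decide ('A' ≤ c) && decide (c ≤ 'Z')) : Int) := by
        rcases hpre with h | h | h
        · omega
        · rw [pvReplaceDashLen s] at hg; exact absurd h hg
        · exact h
      rw [pvALoop_eq s.toList loc 0 (by omega) hle]
      show 0 + PySem.List.pyGetD (pvUps s.toList 0) (loc - 1) 0 + 1
        = PySem.List.pyGetD (pvUps s.toList 0) (loc - 1) 0 + 1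
      omega
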